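-- pv_equiv track=rewrite | github.com/pot030321/Visualize_block_logic-Version-1-for-ML- | ml_code_editor.py | classify_code_line
-- ===== SOURCE A (Python) =====
-- def classify_code_line(line):
--     """Classify a line of code into a category"""
--     line_lower = line.lower()
--
--     if 'import' in line_lower:
--         return 'import'
--     elif any(keyword in line_lower for keyword in ['make_classification', 'make_regression', 'load_iris', 'fetch_california_housing']):
--         return 'data_load'
--     elif any(keyword in line_lower for keyword in ['train_test_split', 'standardscaler', 'labelencoder']):
--         return 'preprocessing'
--     elif any(keyword in line_lower for keyword in ['linearregression', 'logisticregression', 'decisiontree', 'randomforest']):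
--         return 'model'
--     elif '.fit(' in line_lower:
--         return 'training'
--     elif '.predict(' in line_lower:
--         return 'prediction'
--     elif any(keyword in line_lower for keyword in ['plt.', 'plot', 'scatter', 'show()']):
--         return 'visualization'
--     elif any(keyword in line_lower for keyword in ['accuracy_score', 'mean_squared_error', 'classification_report']):
--         return 'evaluation'
--     else:
--         return 'other'
-- ===== SOURCE B (Python) =====
-- # Flat keyword -> priority table; best (lowest) priority among ALL matching
-- # keywords decides the category, instead of an ordered elif cascade.
-- KEYWORDS = [
--     ('import', 0),
--     ('make_classification', 1), ('make_regression', 1), ('load_iris', 1),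
--     ('fetch_california_housing', 1),
--     ('train_test_split', 2), ('standardscaler', 2), ('labelencoder', 2),
--     ('linearregression', 3), ('logisticregression', 3), ('decisiontree', 3),
--     ('randomforest', 3),
--     ('.fit(', 4),
--     ('.predict(', 5),
--     ('plt.', 6), ('plot', 6), ('scatter', 6), ('show()', 6),
--     ('accuracy_score', 7), ('mean_squared_error', 7),
--     ('classification_report', 7),
-- ]
--
-- CATEGORIES = ['import', 'data_load', 'preprocessing', 'model', 'training',
--               'prediction', 'visualization', 'evaluation', 'other']
--
-- def classify_code_line(line):
--     """Classify a line of code into a category"""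
--     low = line.lower()
--     best = 8
--     for kw, p in KEYWORDS:
--         if kw in low and p < best:
--             best = p
--     return CATEGORIES[best]
-- ===== Notes on version B (the rewrite author's own statement) =====
-- stated objective: alternative
-- what changed: Replaced the 8-branch early-return elif cascade with a flat keyword->priority table: a single accumulator loop computes the minimum priority over ALL matching keywords (no ordered category checks, no early exit) and indexes into a category array.
import Mathlib
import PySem

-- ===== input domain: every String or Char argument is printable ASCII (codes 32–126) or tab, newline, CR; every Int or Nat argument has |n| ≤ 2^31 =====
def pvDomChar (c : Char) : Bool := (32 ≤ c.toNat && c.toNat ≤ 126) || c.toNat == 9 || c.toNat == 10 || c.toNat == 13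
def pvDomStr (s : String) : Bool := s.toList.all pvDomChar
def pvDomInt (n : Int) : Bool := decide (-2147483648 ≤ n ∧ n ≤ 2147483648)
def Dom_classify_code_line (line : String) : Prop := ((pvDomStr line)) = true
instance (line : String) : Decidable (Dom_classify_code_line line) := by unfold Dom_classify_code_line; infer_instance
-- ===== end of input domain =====

-- B replaces A's early-return elif cascade by a flat keyword→priority table: one accumulator
-- loop takes the minimum priority over all matching keywords, then indexes a category array
-- (alternative decomposition; same cost).


-- ===== PORT A =====
def classify_code_line (line : String) : String :=
  let line_lower := PySem.Str.lower line
  if PySem.Str.isIn "import" line_lower then "import"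
  else if ["make_classification", "make_regression", "load_iris", "fetch_california_housing"].any (fun keyword => PySem.Str.isIn keyword line_lower) then "data_load"
  else if ["train_test_split", "standardscaler", "labelencoder"].any (fun keyword => PySem.Str.isIn keyword line_lower) then "preprocessing"
  else if ["linearregression", "logisticregression", "decisiontree", "randomforest"].any (fun keyword => PySem.Str.isIn keyword line_lower) then "model"
  else if PySem.Str.isIn ".fit(" line_lower then "training"
  else if PySem.Str.isIn ".predict(" line_lower then "prediction"
  else if ["plt.", "plot", "scatter", "show()"].any (fun keyword => PySem.Str.isIn keyword line_lower) then "visualization"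
  else if ["accuracy_score", "mean_squared_error", "classification_report"].any (fun keyword => PySem.Str.isIn keyword line_lower) then "evaluation"
  else "other"

-- ===== PORT B =====
def pvKeywords : List (String × Nat) :=
  [("import", 0),
   ("make_classification", 1), ("make_regression", 1), ("load_iris", 1), ("fetch_california_housing", 1),
   ("train_test_split", 2), ("standardscaler", 2), ("labelencoder", 2),
   ("linearregression", 3), ("logisticregression", 3), ("decisiontree", 3), ("randomforest", 3),
   (".fit(", 4),
   (".predict(", 5),
   ("plt.", 6), ("plot", 6), ("scatter", 6), ("show()", 6),
   ("accuracy_score", 7), ("mean_squared_error", 7), ("classification_report", 7)]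

def pvCategories : List String :=
  ["import", "data_load", "preprocessing", "model", "training",
   "prediction", "visualization", "evaluation", "other"]

def classify_code_line_alt (line : String) : String :=
  let low := PySem.Str.lower line
  let best := pvKeywords.foldl
    (fun best kp => if PySem.Str.isIn kp.1 low && decide (kp.2 < best) then kp.2 else best) 8
  -- CATEGORIES[best]: best is always in range 0..8, so getD is exact for Python's indexing
  pvCategories.getD best "other"

-- ===== PRECONDITION & SPEC =====
def Spec_classify_code_line (line : String) (out : String) : Prop := out = classify_code_line_alt line
instance (line : String) (out : String) : Decidable (Spec_classify_code_line line out) := by unfold Spec_classify_code_line; infer_instance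

-- ===== CLAIM (what is proved, stated in full; the proofs are below) =====
def Claim_equal_classify_code_line : Prop := ∀ (line : String), Dom_classify_code_line line → Spec_classify_code_line line (classify_code_line line)

-- ===== LEMMAS AND PROOFS =====

-- ===== VERDICT (by name: the statement is the Claim_ definition above) =====
theorem classify_code_line_spec : Claim_equal_classify_code_line := by
  intro line _
  unfold Spec_classify_code_line classify_code_line classify_code_line_alt pvKeywords pvCategories
  simp only [List.any_cons, List.any_nil, Bool.or_eq_true, Bool.or_false]
  split_ifs with h1 h2 h3 h4 h5 h6 h7 h8
  · simp at h1
    simp [h1]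
  · cases hb1 : PySem.Str.isIn "make_classification" (PySem.Str.lower line) <;>
    cases hb2 : PySem.Str.isIn "make_regression" (PySem.Str.lower line) <;>
    cases hb3 : PySem.Str.isIn "load_iris" (PySem.Str.lower line) <;>
    cases hb4 : PySem.Str.isIn "fetch_california_housing" (PySem.Str.lower line) <;>
    simp at h1 hb1 hb2 hb3 hb4 <;>
    first
      | (simp [h1, hb1, hb2, hb3, hb4]; done)
      | simp [hb1, hb2, hb3, hb4] at h2
  · cases hb1 : PySem.Str.isIn "train_test_split" (PySem.Str.lower line) <;>
    cases hb2 : PySem.Str.isIn "standardscaler" (PySem.Str.lower line) <;>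
    cases hb3 : PySem.Str.isIn "labelencoder" (PySem.Str.lower line) <;>
    simp at h1 h2 hb1 hb2 hb3 <;>
    first
      | (simp [h1, h2, hb1, hb2, hb3]; done)
      | simp [hb1, hb2, hb3] at h3
  · cases hb1 : PySem.Str.isIn "linearregression" (PySem.Str.lower line) <;>
    cases hb2 : PySem.Str.isIn "logisticregression" (PySem.Str.lower line) <;>
    cases hb3 : PySem.Str.isIn "decisiontree" (PySem.Str.lower line) <;>
    cases hb4 : PySem.Str.isIn "randomforest" (PySem.Str.lower line) <;>
    simp at h1 h2 h3 hb1 hb2 hb3 hb4 <;>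
    first
      | (simp [h1, h2, h3, hb1, hb2, hb3, hb4]; done)
      | simp [hb1, hb2, hb3, hb4] at h4
  · simp at h1 h2 h3 h4 h5
    simp [h1, h2, h3, h4, h5]
  · simp at h1 h2 h3 h4 h5 h6
    simp [h1, h2, h3, h4, h5, h6]
  · cases hb1 : PySem.Str.isIn "plt." (PySem.Str.lower line) <;>
    cases hb2 : PySem.Str.isIn "plot" (PySem.Str.lower line) <;>
    cases hb3 : PySem.Str.isIn "scatter" (PySem.Str.lower line) <;>
    cases hb4 : PySem.Str.isIn "show()" (PySem.Str.lower line) <;>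
    simp at h1 h2 h3 h4 h5 h6 hb1 hb2 hb3 hb4 <;>
    first
      | (simp [h1, h2, h3, h4, h5, h6, hb1, hb2, hb3, hb4]; done)
      | simp [hb1, hb2, hb3, hb4] at h7
  · cases hb1 : PySem.Str.isIn "accuracy_score" (PySem.Str.lower line) <;>
    cases hb2 : PySem.Str.isIn "mean_squared_error" (PySem.Str.lower line) <;>
    cases hb3 : PySem.Str.isIn "classification_report" (PySem.Str.lower line) <;>
    simp at h1 h2 h3 h4 h5 h6 h7 hb1 hb2 hb3 <;>
    first
      | (simp [h1, h2, h3, h4, h5, h6, h7, hb1, hb2, hb3]; done)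
      | simp [hb1, hb2, hb3] at h8
  · simp at h1 h2 h3 h4 h5 h6 h7 h8
    simp [h1, h2, h3, h4, h5, h6, h7, h8]
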